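-- pv_equiv track=rewrite | github.com/TheSeanLavery/BubbleSockets | simple_server.py | checkerboard_pattern
-- ===== SOURCE A (Python) =====
-- def checkerboard_pattern(rows, cols):
--     # First all evens, then all odds
--     evens = []
--     odds = []
--
--     for r in range(rows):
--         for c in range(cols):
--             idx = r * cols + c
--             if (r + c) % 2 == 0:
--                 evens.append(idx)
--             else:
--                 odds.append(idx)
--
--     return evens + odds
-- ===== SOURCE B (Python) =====
-- def checkerboard_pattern(rows, cols):
--     # Branchless: in row r the even-parity columns are r%2, r%2+2, ... ; odd-parity start at (r+1)%2.
--     evens = [r * cols + c for r in range(rows) for c in range(r % 2, cols, 2)]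
--     odds = [r * cols + c for r in range(rows) for c in range((r + 1) % 2, cols, 2)]
--     return evens + odds
-- ===== Notes on version B (the rewrite author's own statement) =====
-- stated objective: alternative
-- what changed: Replaces the per-cell parity test over the full grid with two branchless stride-2 range comprehensions per row (even-parity columns start at r%2, odd-parity at (r+1)%2), concatenated.
import Mathlib
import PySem

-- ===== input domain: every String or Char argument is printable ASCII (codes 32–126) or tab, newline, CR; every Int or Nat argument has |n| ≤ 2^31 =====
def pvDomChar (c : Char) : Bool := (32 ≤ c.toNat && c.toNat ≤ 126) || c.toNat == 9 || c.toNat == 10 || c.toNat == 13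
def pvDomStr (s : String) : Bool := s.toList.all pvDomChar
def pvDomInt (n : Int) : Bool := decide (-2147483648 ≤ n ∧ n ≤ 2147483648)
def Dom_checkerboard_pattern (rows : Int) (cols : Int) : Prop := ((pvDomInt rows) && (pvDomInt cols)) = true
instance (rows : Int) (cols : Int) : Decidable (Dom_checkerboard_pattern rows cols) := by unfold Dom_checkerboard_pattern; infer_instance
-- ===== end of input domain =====

-- B replaces A's per-cell parity test by branchless stride-2 column ranges per row (objective: alternative).


-- ===== PORT A =====
-- nested loops over the grid; each cell's index appended to evens or odds by the parity of r+c
def checkerboard_pattern (rows : Int) (cols : Int) : List Int :=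
  let p := (PySem.List.pyRange 0 rows 1).foldl
    (fun (acc : List Int × List Int) r =>
      (PySem.List.pyRange 0 cols 1).foldl
        (fun (acc : List Int × List Int) c =>
          let idx := r * cols + c
          if PySem.Int.mod (r + c) 2 = 0 then (acc.1 ++ [idx], acc.2)
          else (acc.1, acc.2 ++ [idx]))
        acc)
    ([], [])
  p.1 ++ p.2

-- ===== PORT B =====
-- branchless: per row r, even-parity columns are range(r%2, cols, 2), odd-parity range((r+1)%2, cols, 2)
def checkerboard_pattern_alt (rows : Int) (cols : Int) : List Int :=
  let evens := (PySem.List.pyRange 0 rows 1).flatMap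
    (fun r => (PySem.List.pyRange (PySem.Int.mod r 2) cols 2).map (fun c => r * cols + c))
  let odds := (PySem.List.pyRange 0 rows 1).flatMap
    (fun r => (PySem.List.pyRange (PySem.Int.mod (r + 1) 2) cols 2).map (fun c => r * cols + c))
  evens ++ odds

-- ===== PRECONDITION & SPEC =====
def Spec_checkerboard_pattern (rows : Int) (cols : Int) (out : List Int) : Prop := out = checkerboard_pattern_alt rows cols
instance (rows : Int) (cols : Int) (out : List Int) : Decidable (Spec_checkerboard_pattern rows cols out) := by unfold Spec_checkerboard_pattern; infer_instance

-- ===== CLAIM (what is proved, stated in full; the proofs are below) =====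
def Claim_equal_checkerboard_pattern : Prop := ∀ (rows : Int) (cols : Int), Dom_checkerboard_pattern rows cols → Spec_checkerboard_pattern rows cols (checkerboard_pattern rows cols)

-- ===== LEMMAS AND PROOFS =====

-- stride-2 range grows on the right by b exactly when b has parity s (s ∈ {0,1})
theorem pv_stride2_succ (s : Int) (hs : s = 0 ∨ s = 1) (m : Nat) :
    PySem.List.pyRange s ((m : Int) + 1) 2 =
      PySem.List.pyRange s (m : Int) 2 ++ (if (m : Int) % 2 = s then [(m : Int)] else []) := by
  rw [PySem.List.pyRange_of_pos s ((m : Int) + 1) (by norm_num),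
      PySem.List.pyRange_of_pos s (m : Int) (by norm_num)]
  by_cases hpar : (m : Int) % 2 = s
  · have hc : (if s < (m : Int) + 1 then (((m : Int) + 1 - s + 2 - 1) / 2).toNat else 0)
        = (if s < (m : Int) then (((m : Int) - s + 2 - 1) / 2).toNat else 0) + 1 := by
      rcases hs with h | h <;> subst h <;> split_ifs <;> omega
    rw [hc, List.range_succ, List.map_append, if_pos hpar]
    congr 1
    simp only [List.map_cons, List.map_nil, List.cons.injEq, and_true]
    rcases hs with h | h <;> subst h <;> split_ifs <;> omega
  · have hc : (if s < (m : Int) + 1 then (((m : Int) + 1 - s + 2 - 1) / 2).toNat else 0)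
        = (if s < (m : Int) then (((m : Int) - s + 2 - 1) / 2).toNat else 0) := by
      rcases hs with h | h <;> subst h <;> split_ifs <;> omega
    rw [hc, if_neg hpar, List.append_nil]

-- the inner per-row scan equals the two stride-2 ranges appended to the accumulators
theorem pv_inner (f : Int → Int) (s : Int) (hs : s = 0 ∨ s = 1) (m : Nat) (e o : List Int) :
    (PySem.List.pyRange 0 (m : Int) 1).foldl
      (fun (acc : List Int × List Int) c =>
        if c % 2 = s then (acc.1 ++ [f c], acc.2) else (acc.1, acc.2 ++ [f c])) (e, o)
    = (e ++ (PySem.List.pyRange s (m : Int) 2).map f,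
       o ++ (PySem.List.pyRange (1 - s) (m : Int) 2).map f) := by
  induction m generalizing e o with
  | zero =>
      rcases hs with h | h <;> subst h <;>
        simp [PySem.List.pyRange_one_eq_nil, PySem.List.pyRange]
  | succ n ih =>
      have hr : ((n : Int) + 1 : Int) = ((n + 1 : Nat) : Int) := by push_cast; ring
      rw [← hr, PySem.List.pyRange_one_succ_right (by positivity), List.foldl_append, ih,
          pv_stride2_succ s hs n, pv_stride2_succ (1 - s) (by omega) n]
      have hne : ¬ ((1 : Int) - s = s) := by omega
      by_cases hpar : (n : Int) % 2 = s
      · have hpar' : ¬ ((n : Int) % 2 = 1 - s) := by omega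
        have hne2 : ¬ (s = 1 - s) := by omega
        simp [hpar, hpar', hne, hne2]
      · have hpar' : (n : Int) % 2 = 1 - s := by omega
        simp [hpar, hpar', hne]

-- the outer loop: A's accumulator pair equals B's two flatMaps
theorem pv_outer (cols : Int) (n : Nat) (e o : List Int) :
    (PySem.List.pyRange 0 (n : Int) 1).foldl
      (fun (acc : List Int × List Int) r =>
        (PySem.List.pyRange 0 cols 1).foldl
          (fun (acc : List Int × List Int) c =>
            let idx := r * cols + c
            if PySem.Int.mod (r + c) 2 = 0 then (acc.1 ++ [idx], acc.2)
            else (acc.1, acc.2 ++ [idx])) acc) (e, o)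
    = (e ++ (PySem.List.pyRange 0 (n : Int) 1).flatMap
          (fun r => (PySem.List.pyRange (PySem.Int.mod r 2) cols 2).map (fun c => r * cols + c)),
       o ++ (PySem.List.pyRange 0 (n : Int) 1).flatMap
          (fun r => (PySem.List.pyRange (PySem.Int.mod (r + 1) 2) cols 2).map (fun c => r * cols + c))) := by
  induction n generalizing e o with
  | zero => simp [PySem.List.pyRange_one_eq_nil]
  | succ k ih =>
      have hr : ((k : Int) + 1 : Int) = ((k + 1 : Nat) : Int) := by push_cast; ring
      rw [← hr, PySem.List.pyRange_one_succ_right (by positivity), List.foldl_append,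
          List.flatMap_append, List.flatMap_append, ih]
      simp only [List.foldl_cons, List.foldl_nil, List.flatMap_cons, List.flatMap_nil,
        List.append_nil, ← List.append_assoc]
      -- rewrite the inner fold's condition to a parity test on c alone
      have hmod : ∀ a : Int, PySem.Int.mod a 2 = a % 2 :=
        fun a => PySem.Int.mod_eq_emod_of_pos (by norm_num)
      have hcond : ∀ c : Int, (PySem.Int.mod ((k : Int) + c) 2 = 0) = (c % 2 = (k : Int) % 2) := by
        intro c; rw [hmod]; apply propext; omega
      -- handle both possible sign of cols: empty inner scan, or cols = ↑m
      rcases (by omega : cols ≤ 0 ∨ 0 < cols) with hneg | hpos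
      · have h1 : PySem.List.pyRange 0 cols 1 = [] := PySem.List.pyRange_one_eq_nil hneg
        have h2 : ∀ s : Int, s = 0 ∨ s = 1 → PySem.List.pyRange s cols 2 = [] := by
          intro s hs
          rw [PySem.List.pyRange_of_pos s cols (by norm_num)]
          have : ¬ s < cols := by omega
          simp [this]
        have e1 : PySem.List.pyRange ((k : Int) % 2) cols 2 = [] :=
          h2 _ (by omega)
        have e2 : PySem.List.pyRange (((k : Int) + 1) % 2) cols 2 = [] :=
          h2 _ (by omega)
        rw [h1]
        simp [hmod, e1, e2]
      · obtain ⟨m, hm⟩ : ∃ m : Nat, cols = (m : Int) := ⟨cols.toNat, by omega⟩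
        subst hm
        simp only [hcond]
        have hk : (k : Int) % 2 = 0 ∨ (k : Int) % 2 = 1 := by omega
        rw [pv_inner (fun c => (k : Int) * (m : Int) + c) ((k : Int) % 2) hk m]
        have h1 : PySem.Int.mod (k : Int) 2 = (k : Int) % 2 := hmod _
        have h2 : PySem.Int.mod ((k : Int) + 1) 2 = 1 - (k : Int) % 2 := by rw [hmod]; omega
        rw [h1, h2]

-- ===== VERDICT (by name: the statement is the Claim_ definition above) =====
theorem checkerboard_pattern_spec : Claim_equal_checkerboard_pattern := by
  intro rows cols _
  unfold Spec_checkerboard_pattern checkerboard_pattern checkerboard_pattern_alt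
  rcases (by omega : rows ≤ 0 ∨ 0 < rows) with hneg | hpos
  · rw [PySem.List.pyRange_one_eq_nil hneg]; simp
  · obtain ⟨n, hn⟩ : ∃ n : Nat, rows = (n : Int) := ⟨rows.toNat, by omega⟩
    subst hn
    rw [pv_outer cols n [] []]
    simp
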